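-- pv_equiv track=rewrite | github.com/mshablovskyy/prg-basics | 04-Functions/4.7.15.py | f
-- ===== SOURCE A (Python) =====
-- def f(var):
--     people = 0
--     for i in var:
--         if i == "+":
--             people += 1
--         elif i == "-":
--             people -= 1
--         if people == 3:
--             return True
--     return False
-- ===== SOURCE B (Python) =====
-- def f(var):
--     n = len(var)
--     for k in range(1, n + 1):
--         prefix = var[:k]
--         ups = sum(1 if c == "+" else 0 for c in prefix)
--         downs = sum(1 if c == "-" else 0 for c in prefix)
--         if ups - downs == 3:
--             return True
--     return False
-- ===== Notes on version B (the rewrite author's own statement) =====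
-- stated objective: alternative
-- what changed: B keeps no running counter at all: for each prefix length k it recounts the '+' and '-' characters of var[:k] from scratch and tests whether their difference is 3, a quadratic stateless brute force over prefixes instead of A's single-pass stateful counter with early return.
import Mathlib
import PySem

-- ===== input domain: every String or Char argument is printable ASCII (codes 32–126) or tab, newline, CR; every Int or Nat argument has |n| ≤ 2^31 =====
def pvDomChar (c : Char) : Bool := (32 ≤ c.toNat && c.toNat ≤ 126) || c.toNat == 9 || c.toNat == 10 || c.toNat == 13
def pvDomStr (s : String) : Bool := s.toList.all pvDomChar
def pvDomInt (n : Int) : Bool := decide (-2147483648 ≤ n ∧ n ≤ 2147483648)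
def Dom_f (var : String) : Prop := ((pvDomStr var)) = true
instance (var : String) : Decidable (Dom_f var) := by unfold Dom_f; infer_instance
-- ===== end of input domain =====

-- B drops A's running counter entirely: for each prefix length k it recounts '+' and '-'
-- in var[:k] from scratch and tests the difference (objective: alternative, quadratic).

-- ===== PORT A =====
-- A's for-loop with early return, as structural recursion over the characters
def fGo : List Char → Int → Bool
  | [], _ => false
  | i :: rest, people =>
    let people := if i = '+' then people + 1 else if i = '-' then people - 1 else people
    if people = 3 then true else fGo rest people

def f (var : String) : Bool := fGo var.toList 0

-- ===== PORT B =====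
def f_alt (var : String) : Bool :=
  let n : Int := var.toList.length
  (PySem.List.pyRange 1 (n + 1) 1).any (fun k =>
    let pre := PySem.List.slice var.toList none (some k)
    let ups := (pre.map (fun c => if c == '+' then (1 : Int) else 0)).sum
    let downs := (pre.map (fun c => if c == '-' then (1 : Int) else 0)).sum
    ups - downs == 3)

-- ===== PRECONDITION & SPEC =====
def Spec_f (var : String) (out : Bool) : Prop := out = f_alt var
instance (var : String) (out : Bool) : Decidable (Spec_f var out) := by unfold Spec_f; infer_instance

-- ===== CLAIM (what is proved, stated in full; the proofs are below) =====
def Claim_equal_f : Prop := ∀ (var : String), Dom_f var → Spec_f var (f var)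

-- ===== LEMMAS AND PROOFS =====

-- the signed count of a prefix: #'+' − #'−'
def pvCnt (t : List Char) : Int := (t.countP (· == '+') : Int) - (t.countP (· == '-') : Int)

theorem pvCnt_cons (c : Char) (t : List Char) :
    pvCnt (c :: t) = (if c = '+' then 1 else if c = '-' then -1 else 0) + pvCnt t := by
  unfold pvCnt
  by_cases h1 : c = '+' <;> by_cases h2 : c = '-' <;>
    simp_all <;> ring

-- A's loop answers: does some prefix sum starting from p hit 3?
theorem fGo_eq_range (l : List Char) (p : Int) :
    fGo l p = (List.range l.length).any (fun j => p + pvCnt (l.take (j + 1)) == 3) := by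
  induction l generalizing p with
  | nil => simp [fGo]
  | cons c rest ih =>
    have hstep : (if c = '+' then p + 1 else if c = '-' then p - 1 else p)
        = p + (if c = '+' then 1 else if c = '-' then -1 else 0) := by
      split_ifs <;> ring
    have h1 : pvCnt [c] = (if c = '+' then 1 else if c = '-' then -1 else 0) := by
      by_cases ha : c = '+' <;> by_cases hb : c = '-' <;> simp_all [pvCnt]
    simp only [fGo, hstep, List.length_cons, List.range_succ_eq_map, List.any_cons,
      List.any_map]
    rw [ih (p + (if c = '+' then 1 else if c = '-' then -1 else 0))]
    by_cases h : p + (if c = '+' then 1 else if c = '-' then -1 else 0) = 3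
    · simp [h1, h]
    · rw [if_neg h]
      have hfst : ((p + pvCnt ((c :: rest).take 1) == 3) : Bool) = false := by
        simp [h1]; exact h
      simp only [List.take_succ_cons, List.take_zero] at hfst ⊢
      rw [hfst, Bool.false_or]
      congr 1
      funext j
      simp only [Function.comp_apply, Nat.succ_eq_add_one, pvCnt_cons]
      congr 1
      ring

theorem f_alt_eq_range (var : String) :
    f_alt var = (List.range var.toList.length).any
      (fun j => 0 + pvCnt (var.toList.take (j + 1)) == 3) := by
  simp only [f_alt]
  rw [PySem.List.pyRange_one]
  have hn : ((var.toList.length : Int) + 1 - 1).toNat = var.toList.length := by omega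
  rw [hn, List.any_map]
  congr 1
  funext j
  simp only [Function.comp_apply]
  have hk : (1 : Int) + (j : Int) = ((j + 1 : Nat) : Int) := by push_cast; ring
  rw [hk, PySem.List.slice_to_natCast]
  have h1 : ((var.toList.take (j + 1)).map (fun c => if c == '+' then (1 : Int) else 0)).sum
      = ((var.toList.take (j + 1)).countP (· == '+') : Int) :=
    PySem.List.sum_map_ite_one_zero _ _
  have h2 : ((var.toList.take (j + 1)).map (fun c => if c == '-' then (1 : Int) else 0)).sum
      = ((var.toList.take (j + 1)).countP (· == '-') : Int) :=
    PySem.List.sum_map_ite_one_zero _ _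
  simp only [h1, h2, pvCnt]
  congr 1
  ring

-- ===== VERDICT (by name: the statement is the Claim_ definition above) =====
theorem f_spec : Claim_equal_f := by
  intro var _
  unfold Spec_f f
  rw [f_alt_eq_range, fGo_eq_range]
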